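-- pv_equiv track=rewrite | github.com/barseghyanartur/license-normaliser | scripts/compare_scancode_categories.py | strip_version
-- ===== SOURCE A (Python) =====
-- def strip_version(key: str) -> str:
--     """Strip common version suffixes to get name_key."""
--     suffixes = [
--         "-1.0",
--         "-2.0",
--         "-3.0",
--         "-4.0",
--         "-5.0",
--         "-1",
--         "-2",
--         "-3",
--         "-4",
--         "-5",
--         "-1.1",
--         "-2.1",
--         "-3.1",
--         "-0",
--         "-0.1",
--         "-0.2",
--         "-only",
--         "-or-later",
--     ]
--     for suffix in suffixes:
--         if key.endswith(suffix):
--             return key[: -len(suffix)]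
--     return key
-- ===== SOURCE B (Python) =====
-- # The suffix list below is the problem's DATA (shared with the original); the
-- # algorithm differs: instead of probing the key with endswith for each suffix,
-- # we compile the reversed suffixes into a trie/DFA once and scan the key
-- # backwards through it a single time.
-- SUFFIXES = [
--     "-1.0", "-2.0", "-3.0", "-4.0", "-5.0",
--     "-1", "-2", "-3", "-4", "-5",
--     "-1.1", "-2.1", "-3.1",
--     "-0", "-0.1", "-0.2",
--     "-only", "-or-later",
-- ]
--
--
-- def _build():
--     """Build a trie (as a flat DFA) of the REVERSED suffixes."""
--     trans = {}
--     term = set()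
--     n_states = 1
--     for s in SUFFIXES:
--         st = 0
--         for ch in reversed(s):
--             nxt = trans.get((st, ch))
--             if nxt is None:
--                 nxt = n_states
--                 trans[(st, ch)] = nxt
--                 n_states += 1
--             st = nxt
--         term.add(st)
--     return trans, term
--
--
-- _TRANS, _TERM = _build()
--
--
-- def strip_version(key: str) -> str:
--     """Strip common version suffixes to get name_key."""
--     st = 0
--     for i in range(len(key) - 1, -1, -1):
--         nxt = _TRANS.get((st, key[i]))
--         if nxt is None:
--             return key
--         st = nxt
--         if st in _TERM:
--             return key[:i]
--     return key
-- ===== Notes on version B (the rewrite author's own statement) =====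
-- stated objective: alternative
-- what changed: A linearly probes the key with endswith against each of the 18 suffixes; B builds a trie of the reversed suffixes once (a flat DFA: transition dict + accepting-state set) and walks the key backwards through it, stripping at the accepting state; since no suffix is a suffix of another, the unique DFA acceptance equals A's first endswith hit.
import Mathlib
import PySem

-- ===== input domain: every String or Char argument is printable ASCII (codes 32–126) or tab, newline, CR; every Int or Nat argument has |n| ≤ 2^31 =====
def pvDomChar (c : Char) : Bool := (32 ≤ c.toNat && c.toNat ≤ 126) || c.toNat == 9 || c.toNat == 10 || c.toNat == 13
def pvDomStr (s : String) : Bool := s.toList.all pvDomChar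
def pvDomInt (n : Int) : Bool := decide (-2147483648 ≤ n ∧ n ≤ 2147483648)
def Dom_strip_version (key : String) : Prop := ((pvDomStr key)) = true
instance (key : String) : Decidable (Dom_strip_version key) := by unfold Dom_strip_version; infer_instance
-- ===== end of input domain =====

-- B replaces A's 18 endswith probes by a reversed-suffix trie, built once from the
-- suffix list as a flat DFA (transition table + terminal set) and walked once
-- backwards over the key (objective: alternative algorithm/data structure).

-- ===== PORT A =====
-- A: for suffix in suffixes: if key.endswith(suffix): return key[: -len(suffix)]
def stripLoop : List String → String → String
  | [], key => key
  | s :: rest, key =>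
    if PySem.Str.endswith key s then PySem.Str.slice key none (some (-(PySem.Str.len s)))
    else stripLoop rest key

def strip_version (key : String) : String :=
  stripLoop ["-1.0", "-2.0", "-3.0", "-4.0", "-5.0", "-1", "-2", "-3", "-4", "-5",
             "-1.1", "-2.1", "-3.1", "-0", "-0.1", "-0.2", "-only", "-or-later"] key

-- ===== PORT B =====
-- B: _build(): insert each reversed suffix into a flat trie/DFA
--    (trans : dict[(state, ch)] -> state, term : set of accepting states, fresh-state counter),
--    then walk the key backwards through the DFA; on an accepting state return key[:i].
def bSuffixes : List String :=
  ["-1.0", "-2.0", "-3.0", "-4.0", "-5.0", "-1", "-2", "-3", "-4", "-5",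
   "-1.1", "-2.1", "-3.1", "-0", "-0.1", "-0.2", "-only", "-or-later"]

def bBuild : PySem.Dict (Int × Char) Int × PySem.Set Int × Int :=
  bSuffixes.foldl
    (fun acc s =>
      let r := s.toList.reverse.foldl
        (fun (p : PySem.Dict (Int × Char) Int × Int × Int) ch =>
          match PySem.Dict.get? p.1 (p.2.1, ch) with
          | some nxt => (p.1, nxt, p.2.2)
          | none => (PySem.Dict.insert p.1 (p.2.1, ch) p.2.2, p.2.2, p.2.2 + 1))
        (acc.1, 0, acc.2.2)
      (r.1, PySem.Set.add acc.2.1 r.2.1, r.2.2))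
    (PySem.Dict.empty, PySem.Set.empty, 1)

def bTrans : PySem.Dict (Int × Char) Int := bBuild.1
def bTerm : PySem.Set Int := bBuild.2.1

-- for i in range(len(key)-1, -1, -1): walk key[i] through the DFA; key[:i] on acceptance
def bWalk (key : String) : Int → List Char → Int → String
  | _, [], _ => key
  | st, c :: rest, i =>
    match PySem.Dict.get? bTrans (st, c) with
    | none => key
    | some st' =>
      if PySem.Set.contains bTerm st' then PySem.Str.slice key none (some i)
      else bWalk key st' rest (i - 1)

def strip_version_alt (key : String) : String :=
  bWalk key 0 key.toList.reverse (PySem.Str.len key - 1)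

-- ===== PRECONDITION & SPEC =====
def Spec_strip_version (key : String) (out : String) : Prop := out = strip_version_alt key
instance (key : String) (out : String) : Decidable (Spec_strip_version key out) := by unfold Spec_strip_version; infer_instance

-- ===== CLAIM (what is proved, stated in full; the proofs are below) =====
def Claim_equal_strip_version : Prop := ∀ (key : String), Dom_strip_version key → Spec_strip_version key (strip_version key)

-- ===== LEMMAS AND PROOFS =====

set_option maxRecDepth 8000
set_option maxHeartbeats 1000000

lemma bWalk_cons (key : String) (st : Int) (c : Char) (rest : List Char) (i : Int) :
    bWalk key st (c :: rest) i =
      (match PySem.Dict.get? bTrans (st, c) with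
       | none => key
       | some st' =>
         if PySem.Set.contains bTerm st' then PySem.Str.slice key none (some i)
         else bWalk key st' rest (i - 1)) := rfl

lemma endsC_true {l p : List Char} (h : p <:+ l) :
    PySem.Chars.endswith l p = true := (PySem.Chars.endswith_iff _ _).mpr h

lemma endsC_false {l p : List Char} (h : ¬ p <:+ l) :
    PySem.Chars.endswith l p = false :=
  Bool.eq_false_iff.mpr (fun hc => h ((PySem.Chars.endswith_iff _ _).mp hc))

lemma slice_clamp_eq (key : String) (a b : Int)
    (h : PySem.List.clampIdx key.toList.length a = PySem.List.clampIdx key.toList.length b) :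
    PySem.Str.slice key none (some a) = PySem.Str.slice key none (some b) := by
  apply String.toList_inj.mp
  simp only [PySem.Str.toList_slice, PySem.Chars.slice_eq_listSlice, PySem.List.slice]
  rw [h]

-- the reversed suffixes (read order of B's backward walk), in A's list order
def revSufs : List (List Char) :=

  [['0', '.', '1', '-'],
   ['0', '.', '2', '-'],
   ['0', '.', '3', '-'],
   ['0', '.', '4', '-'],
   ['0', '.', '5', '-'],
   ['1', '-'],
   ['2', '-'],
   ['3', '-'],
   ['4', '-'],
   ['5', '-'],
   ['1', '.', '1', '-'],
   ['1', '.', '2', '-'],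
   ['1', '.', '3', '-'],
   ['0', '-'],
   ['1', '.', '0', '-'],
   ['2', '.', '0', '-'],
   ['y', 'l', 'n', 'o', '-'],
   ['r', 'e', 't', 'a', 'l', '-', 'r', 'o', '-']]

-- each DFA state of bTrans paired with the unique reversed-character path reaching it
def pathTbl : List (Int × List Char) :=

  [((0 : Int), []),
   ((1 : Int), ['0']),
   ((2 : Int), ['0', '.']),
   ((3 : Int), ['0', '.', '1']),
   ((4 : Int), ['0', '.', '1', '-']),
   ((5 : Int), ['0', '.', '2']),
   ((6 : Int), ['0', '.', '2', '-']),
   ((7 : Int), ['0', '.', '3']),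
   ((8 : Int), ['0', '.', '3', '-']),
   ((9 : Int), ['0', '.', '4']),
   ((10 : Int), ['0', '.', '4', '-']),
   ((11 : Int), ['0', '.', '5']),
   ((12 : Int), ['0', '.', '5', '-']),
   ((13 : Int), ['1']),
   ((14 : Int), ['1', '-']),
   ((15 : Int), ['2']),
   ((16 : Int), ['2', '-']),
   ((17 : Int), ['3']),
   ((18 : Int), ['3', '-']),
   ((19 : Int), ['4']),
   ((20 : Int), ['4', '-']),
   ((21 : Int), ['5']),
   ((22 : Int), ['5', '-']),
   ((23 : Int), ['1', '.']),
   ((24 : Int), ['1', '.', '1']),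
   ((25 : Int), ['1', '.', '1', '-']),
   ((26 : Int), ['1', '.', '2']),
   ((27 : Int), ['1', '.', '2', '-']),
   ((28 : Int), ['1', '.', '3']),
   ((29 : Int), ['1', '.', '3', '-']),
   ((30 : Int), ['0', '-']),
   ((31 : Int), ['1', '.', '0']),
   ((32 : Int), ['1', '.', '0', '-']),
   ((33 : Int), ['2', '.']),
   ((34 : Int), ['2', '.', '0']),
   ((35 : Int), ['2', '.', '0', '-']),
   ((36 : Int), ['y']),
   ((37 : Int), ['y', 'l']),
   ((38 : Int), ['y', 'l', 'n']),
   ((39 : Int), ['y', 'l', 'n', 'o']),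
   ((40 : Int), ['y', 'l', 'n', 'o', '-']),
   ((41 : Int), ['r']),
   ((42 : Int), ['r', 'e']),
   ((43 : Int), ['r', 'e', 't']),
   ((44 : Int), ['r', 'e', 't', 'a']),
   ((45 : Int), ['r', 'e', 't', 'a', 'l']),
   ((46 : Int), ['r', 'e', 't', 'a', 'l', '-']),
   ((47 : Int), ['r', 'e', 't', 'a', 'l', '-', 'r']),
   ((48 : Int), ['r', 'e', 't', 'a', 'l', '-', 'r', 'o']),
   ((49 : Int), ['r', 'e', 't', 'a', 'l', '-', 'r', 'o', '-'])]


def pathOf (st : Int) : List Char := (pathTbl.lookup st).getD []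

lemma PT1 : ((0 : Int), ([] : List Char)) ∈ pathTbl := by decide

lemma PTfun : ∀ q ∈ pathTbl, q.2 = pathOf q.1 := by decide

lemma PT2 : ∀ e ∈ bTrans.items, (e.2, pathOf e.1.1 ++ [e.1.2]) ∈ pathTbl := by decide

lemma PT3 : ∀ q ∈ pathTbl, PySem.Set.contains bTerm q.1 = true → q.2 ∈ revSufs := by decide

-- if the walk never sees a full reversed suffix ahead, it falls through and returns key
lemma nohit (key : String) : ∀ (cs : List Char) (st : Int) (p : List Char) (i : Int),
    (st, p) ∈ pathTbl →
    (∀ q ∈ revSufs, ¬ (p <+: q ∧ List.drop p.length q <+: cs)) →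
    bWalk key st cs i = key := by
  intro cs
  induction cs with
  | nil => intro st p i _ _; rfl
  | cons c rest ih =>
    intro st p i hmem hno
    have hp : p = pathOf st := PTfun _ hmem
    rw [bWalk_cons]
    rcases hg : PySem.Dict.get? bTrans (st, c) with _ | st'
    · rfl
    · have hmem' : (st', p ++ [c]) ∈ pathTbl := by
        have h2 := PT2 ((st, c), st') (PySem.Dict.mem_items_of_get?_eq_some _ hg)
        rw [hp]; exact h2
      by_cases hterm : PySem.Set.contains bTerm st' = true
      · exfalso
        refine hno (p ++ [c]) (PT3 _ hmem' hterm) ⟨List.prefix_append p [c], ?_⟩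
        rw [List.drop_left]
        exact ⟨rest, rfl⟩
      · dsimp only
        rw [if_neg hterm]
        apply ih st' (p ++ [c]) (i - 1) hmem'
        rintro q hq ⟨hpre, hdrop⟩
        obtain ⟨t, ht⟩ := hpre
        refine hno q hq ⟨⟨[c] ++ t, by rw [← ht]; simp⟩, ?_⟩
        have hdq : List.drop p.length q = c :: t := by
          rw [← ht, List.append_assoc, List.drop_left, List.singleton_append]
        have ht' : List.drop (p ++ [c]).length q = t := by rw [← ht, List.drop_left]
        rw [ht'] at hdrop
        obtain ⟨u, hu⟩ := hdrop
        rw [hdq]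
        exact ⟨u, by rw [List.cons_append, hu]⟩


lemma bpos_0 (key : String) (m : List Char) (hm : key.toList = m ++ ['-', '1', '.', '0']) :
    strip_version_alt key = PySem.Str.slice key none (some (-4)) := by
  have hlen : key.length = m.length + 4 := by rw [← String.length_toList, hm]; simp
  have hr : key.toList.reverse = ['0', '.', '1', '-'] ++ m.reverse := by rw [hm]; simp
  unfold strip_version_alt
  rw [hr]
  simp [bWalk_cons,
    show PySem.Dict.get? bTrans ((0 : Int), '0') = some 1 from by decide,
    show PySem.Dict.get? bTrans ((1 : Int), '.') = some 2 from by decide,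
    show PySem.Dict.get? bTrans ((2 : Int), '1') = some 3 from by decide,
    show PySem.Dict.get? bTrans ((3 : Int), '-') = some 4 from by decide]
  apply slice_clamp_eq
  simp only [PySem.List.clampIdx, String.length_toList]
  split_ifs <;> omega


lemma bpos_1 (key : String) (m : List Char) (hm : key.toList = m ++ ['-', '2', '.', '0']) :
    strip_version_alt key = PySem.Str.slice key none (some (-4)) := by
  have hlen : key.length = m.length + 4 := by rw [← String.length_toList, hm]; simp
  have hr : key.toList.reverse = ['0', '.', '2', '-'] ++ m.reverse := by rw [hm]; simp
  unfold strip_version_alt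
  rw [hr]
  simp [bWalk_cons,
    show PySem.Dict.get? bTrans ((0 : Int), '0') = some 1 from by decide,
    show PySem.Dict.get? bTrans ((1 : Int), '.') = some 2 from by decide,
    show PySem.Dict.get? bTrans ((2 : Int), '2') = some 5 from by decide,
    show PySem.Dict.get? bTrans ((5 : Int), '-') = some 6 from by decide]
  apply slice_clamp_eq
  simp only [PySem.List.clampIdx, String.length_toList]
  split_ifs <;> omega


lemma bpos_2 (key : String) (m : List Char) (hm : key.toList = m ++ ['-', '3', '.', '0']) :
    strip_version_alt key = PySem.Str.slice key none (some (-4)) := by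
  have hlen : key.length = m.length + 4 := by rw [← String.length_toList, hm]; simp
  have hr : key.toList.reverse = ['0', '.', '3', '-'] ++ m.reverse := by rw [hm]; simp
  unfold strip_version_alt
  rw [hr]
  simp [bWalk_cons,
    show PySem.Dict.get? bTrans ((0 : Int), '0') = some 1 from by decide,
    show PySem.Dict.get? bTrans ((1 : Int), '.') = some 2 from by decide,
    show PySem.Dict.get? bTrans ((2 : Int), '3') = some 7 from by decide,
    show PySem.Dict.get? bTrans ((7 : Int), '-') = some 8 from by decide]
  apply slice_clamp_eq
  simp only [PySem.List.clampIdx, String.length_toList]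
  split_ifs <;> omega


lemma bpos_3 (key : String) (m : List Char) (hm : key.toList = m ++ ['-', '4', '.', '0']) :
    strip_version_alt key = PySem.Str.slice key none (some (-4)) := by
  have hlen : key.length = m.length + 4 := by rw [← String.length_toList, hm]; simp
  have hr : key.toList.reverse = ['0', '.', '4', '-'] ++ m.reverse := by rw [hm]; simp
  unfold strip_version_alt
  rw [hr]
  simp [bWalk_cons,
    show PySem.Dict.get? bTrans ((0 : Int), '0') = some 1 from by decide,
    show PySem.Dict.get? bTrans ((1 : Int), '.') = some 2 from by decide,
    show PySem.Dict.get? bTrans ((2 : Int), '4') = some 9 from by decide,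
    show PySem.Dict.get? bTrans ((9 : Int), '-') = some 10 from by decide]
  apply slice_clamp_eq
  simp only [PySem.List.clampIdx, String.length_toList]
  split_ifs <;> omega


lemma bpos_4 (key : String) (m : List Char) (hm : key.toList = m ++ ['-', '5', '.', '0']) :
    strip_version_alt key = PySem.Str.slice key none (some (-4)) := by
  have hlen : key.length = m.length + 4 := by rw [← String.length_toList, hm]; simp
  have hr : key.toList.reverse = ['0', '.', '5', '-'] ++ m.reverse := by rw [hm]; simp
  unfold strip_version_alt
  rw [hr]
  simp [bWalk_cons,
    show PySem.Dict.get? bTrans ((0 : Int), '0') = some 1 from by decide,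
    show PySem.Dict.get? bTrans ((1 : Int), '.') = some 2 from by decide,
    show PySem.Dict.get? bTrans ((2 : Int), '5') = some 11 from by decide,
    show PySem.Dict.get? bTrans ((11 : Int), '-') = some 12 from by decide]
  apply slice_clamp_eq
  simp only [PySem.List.clampIdx, String.length_toList]
  split_ifs <;> omega


lemma bpos_5 (key : String) (m : List Char) (hm : key.toList = m ++ ['-', '1']) :
    strip_version_alt key = PySem.Str.slice key none (some (-2)) := by
  have hlen : key.length = m.length + 2 := by rw [← String.length_toList, hm]; simp
  have hr : key.toList.reverse = ['1', '-'] ++ m.reverse := by rw [hm]; simp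
  unfold strip_version_alt
  rw [hr]
  simp [bWalk_cons,
    show PySem.Dict.get? bTrans ((0 : Int), '1') = some 13 from by decide,
    show PySem.Dict.get? bTrans ((13 : Int), '-') = some 14 from by decide]
  apply slice_clamp_eq
  simp only [PySem.List.clampIdx, String.length_toList]
  split_ifs <;> omega


lemma bpos_6 (key : String) (m : List Char) (hm : key.toList = m ++ ['-', '2']) :
    strip_version_alt key = PySem.Str.slice key none (some (-2)) := by
  have hlen : key.length = m.length + 2 := by rw [← String.length_toList, hm]; simp
  have hr : key.toList.reverse = ['2', '-'] ++ m.reverse := by rw [hm]; simp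
  unfold strip_version_alt
  rw [hr]
  simp [bWalk_cons,
    show PySem.Dict.get? bTrans ((0 : Int), '2') = some 15 from by decide,
    show PySem.Dict.get? bTrans ((15 : Int), '-') = some 16 from by decide]
  apply slice_clamp_eq
  simp only [PySem.List.clampIdx, String.length_toList]
  split_ifs <;> omega


lemma bpos_7 (key : String) (m : List Char) (hm : key.toList = m ++ ['-', '3']) :
    strip_version_alt key = PySem.Str.slice key none (some (-2)) := by
  have hlen : key.length = m.length + 2 := by rw [← String.length_toList, hm]; simp
  have hr : key.toList.reverse = ['3', '-'] ++ m.reverse := by rw [hm]; simp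
  unfold strip_version_alt
  rw [hr]
  simp [bWalk_cons,
    show PySem.Dict.get? bTrans ((0 : Int), '3') = some 17 from by decide,
    show PySem.Dict.get? bTrans ((17 : Int), '-') = some 18 from by decide]
  apply slice_clamp_eq
  simp only [PySem.List.clampIdx, String.length_toList]
  split_ifs <;> omega


lemma bpos_8 (key : String) (m : List Char) (hm : key.toList = m ++ ['-', '4']) :
    strip_version_alt key = PySem.Str.slice key none (some (-2)) := by
  have hlen : key.length = m.length + 2 := by rw [← String.length_toList, hm]; simp
  have hr : key.toList.reverse = ['4', '-'] ++ m.reverse := by rw [hm]; simp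
  unfold strip_version_alt
  rw [hr]
  simp [bWalk_cons,
    show PySem.Dict.get? bTrans ((0 : Int), '4') = some 19 from by decide,
    show PySem.Dict.get? bTrans ((19 : Int), '-') = some 20 from by decide]
  apply slice_clamp_eq
  simp only [PySem.List.clampIdx, String.length_toList]
  split_ifs <;> omega


lemma bpos_9 (key : String) (m : List Char) (hm : key.toList = m ++ ['-', '5']) :
    strip_version_alt key = PySem.Str.slice key none (some (-2)) := by
  have hlen : key.length = m.length + 2 := by rw [← String.length_toList, hm]; simp
  have hr : key.toList.reverse = ['5', '-'] ++ m.reverse := by rw [hm]; simp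
  unfold strip_version_alt
  rw [hr]
  simp [bWalk_cons,
    show PySem.Dict.get? bTrans ((0 : Int), '5') = some 21 from by decide,
    show PySem.Dict.get? bTrans ((21 : Int), '-') = some 22 from by decide]
  apply slice_clamp_eq
  simp only [PySem.List.clampIdx, String.length_toList]
  split_ifs <;> omega


lemma bpos_10 (key : String) (m : List Char) (hm : key.toList = m ++ ['-', '1', '.', '1']) :
    strip_version_alt key = PySem.Str.slice key none (some (-4)) := by
  have hlen : key.length = m.length + 4 := by rw [← String.length_toList, hm]; simp
  have hr : key.toList.reverse = ['1', '.', '1', '-'] ++ m.reverse := by rw [hm]; simp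
  unfold strip_version_alt
  rw [hr]
  simp [bWalk_cons,
    show PySem.Dict.get? bTrans ((0 : Int), '1') = some 13 from by decide,
    show PySem.Dict.get? bTrans ((13 : Int), '.') = some 23 from by decide,
    show PySem.Dict.get? bTrans ((23 : Int), '1') = some 24 from by decide,
    show PySem.Dict.get? bTrans ((24 : Int), '-') = some 25 from by decide]
  apply slice_clamp_eq
  simp only [PySem.List.clampIdx, String.length_toList]
  split_ifs <;> omega


lemma bpos_11 (key : String) (m : List Char) (hm : key.toList = m ++ ['-', '2', '.', '1']) :
    strip_version_alt key = PySem.Str.slice key none (some (-4)) := by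
  have hlen : key.length = m.length + 4 := by rw [← String.length_toList, hm]; simp
  have hr : key.toList.reverse = ['1', '.', '2', '-'] ++ m.reverse := by rw [hm]; simp
  unfold strip_version_alt
  rw [hr]
  simp [bWalk_cons,
    show PySem.Dict.get? bTrans ((0 : Int), '1') = some 13 from by decide,
    show PySem.Dict.get? bTrans ((13 : Int), '.') = some 23 from by decide,
    show PySem.Dict.get? bTrans ((23 : Int), '2') = some 26 from by decide,
    show PySem.Dict.get? bTrans ((26 : Int), '-') = some 27 from by decide]
  apply slice_clamp_eq
  simp only [PySem.List.clampIdx, String.length_toList]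
  split_ifs <;> omega


lemma bpos_12 (key : String) (m : List Char) (hm : key.toList = m ++ ['-', '3', '.', '1']) :
    strip_version_alt key = PySem.Str.slice key none (some (-4)) := by
  have hlen : key.length = m.length + 4 := by rw [← String.length_toList, hm]; simp
  have hr : key.toList.reverse = ['1', '.', '3', '-'] ++ m.reverse := by rw [hm]; simp
  unfold strip_version_alt
  rw [hr]
  simp [bWalk_cons,
    show PySem.Dict.get? bTrans ((0 : Int), '1') = some 13 from by decide,
    show PySem.Dict.get? bTrans ((13 : Int), '.') = some 23 from by decide,
    show PySem.Dict.get? bTrans ((23 : Int), '3') = some 28 from by decide,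
    show PySem.Dict.get? bTrans ((28 : Int), '-') = some 29 from by decide]
  apply slice_clamp_eq
  simp only [PySem.List.clampIdx, String.length_toList]
  split_ifs <;> omega


lemma bpos_13 (key : String) (m : List Char) (hm : key.toList = m ++ ['-', '0']) :
    strip_version_alt key = PySem.Str.slice key none (some (-2)) := by
  have hlen : key.length = m.length + 2 := by rw [← String.length_toList, hm]; simp
  have hr : key.toList.reverse = ['0', '-'] ++ m.reverse := by rw [hm]; simp
  unfold strip_version_alt
  rw [hr]
  simp [bWalk_cons,
    show PySem.Dict.get? bTrans ((0 : Int), '0') = some 1 from by decide,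
    show PySem.Dict.get? bTrans ((1 : Int), '-') = some 30 from by decide]
  apply slice_clamp_eq
  simp only [PySem.List.clampIdx, String.length_toList]
  split_ifs <;> omega


lemma bpos_14 (key : String) (m : List Char) (hm : key.toList = m ++ ['-', '0', '.', '1']) :
    strip_version_alt key = PySem.Str.slice key none (some (-4)) := by
  have hlen : key.length = m.length + 4 := by rw [← String.length_toList, hm]; simp
  have hr : key.toList.reverse = ['1', '.', '0', '-'] ++ m.reverse := by rw [hm]; simp
  unfold strip_version_alt
  rw [hr]
  simp [bWalk_cons,
    show PySem.Dict.get? bTrans ((0 : Int), '1') = some 13 from by decide,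
    show PySem.Dict.get? bTrans ((13 : Int), '.') = some 23 from by decide,
    show PySem.Dict.get? bTrans ((23 : Int), '0') = some 31 from by decide,
    show PySem.Dict.get? bTrans ((31 : Int), '-') = some 32 from by decide]
  apply slice_clamp_eq
  simp only [PySem.List.clampIdx, String.length_toList]
  split_ifs <;> omega


lemma bpos_15 (key : String) (m : List Char) (hm : key.toList = m ++ ['-', '0', '.', '2']) :
    strip_version_alt key = PySem.Str.slice key none (some (-4)) := by
  have hlen : key.length = m.length + 4 := by rw [← String.length_toList, hm]; simp
  have hr : key.toList.reverse = ['2', '.', '0', '-'] ++ m.reverse := by rw [hm]; simp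
  unfold strip_version_alt
  rw [hr]
  simp [bWalk_cons,
    show PySem.Dict.get? bTrans ((0 : Int), '2') = some 15 from by decide,
    show PySem.Dict.get? bTrans ((15 : Int), '.') = some 33 from by decide,
    show PySem.Dict.get? bTrans ((33 : Int), '0') = some 34 from by decide,
    show PySem.Dict.get? bTrans ((34 : Int), '-') = some 35 from by decide]
  apply slice_clamp_eq
  simp only [PySem.List.clampIdx, String.length_toList]
  split_ifs <;> omega


lemma bpos_16 (key : String) (m : List Char) (hm : key.toList = m ++ ['-', 'o', 'n', 'l', 'y']) :
    strip_version_alt key = PySem.Str.slice key none (some (-5)) := by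
  have hlen : key.length = m.length + 5 := by rw [← String.length_toList, hm]; simp
  have hr : key.toList.reverse = ['y', 'l', 'n', 'o', '-'] ++ m.reverse := by rw [hm]; simp
  unfold strip_version_alt
  rw [hr]
  simp [bWalk_cons,
    show PySem.Dict.get? bTrans ((0 : Int), 'y') = some 36 from by decide,
    show PySem.Dict.get? bTrans ((36 : Int), 'l') = some 37 from by decide,
    show PySem.Dict.get? bTrans ((37 : Int), 'n') = some 38 from by decide,
    show PySem.Dict.get? bTrans ((38 : Int), 'o') = some 39 from by decide,
    show PySem.Dict.get? bTrans ((39 : Int), '-') = some 40 from by decide]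
  apply slice_clamp_eq
  simp only [PySem.List.clampIdx, String.length_toList]
  split_ifs <;> omega


lemma bpos_17 (key : String) (m : List Char) (hm : key.toList = m ++ ['-', 'o', 'r', '-', 'l', 'a', 't', 'e', 'r']) :
    strip_version_alt key = PySem.Str.slice key none (some (-9)) := by
  have hlen : key.length = m.length + 9 := by rw [← String.length_toList, hm]; simp
  have hr : key.toList.reverse = ['r', 'e', 't', 'a', 'l', '-', 'r', 'o', '-'] ++ m.reverse := by rw [hm]; simp
  unfold strip_version_alt
  rw [hr]
  simp [bWalk_cons,
    show PySem.Dict.get? bTrans ((0 : Int), 'r') = some 41 from by decide,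
    show PySem.Dict.get? bTrans ((41 : Int), 'e') = some 42 from by decide,
    show PySem.Dict.get? bTrans ((42 : Int), 't') = some 43 from by decide,
    show PySem.Dict.get? bTrans ((43 : Int), 'a') = some 44 from by decide,
    show PySem.Dict.get? bTrans ((44 : Int), 'l') = some 45 from by decide,
    show PySem.Dict.get? bTrans ((45 : Int), '-') = some 46 from by decide,
    show PySem.Dict.get? bTrans ((46 : Int), 'r') = some 47 from by decide,
    show PySem.Dict.get? bTrans ((47 : Int), 'o') = some 48 from by decide,
    show PySem.Dict.get? bTrans ((48 : Int), '-') = some 49 from by decide]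
  apply slice_clamp_eq
  simp only [PySem.List.clampIdx, String.length_toList]
  split_ifs <;> omega


lemma main_eq (key : String) : strip_version key = strip_version_alt key := by
  by_cases h0 : (['-', '1', '.', '0'] : List Char) <:+ key.toList
  · obtain ⟨m, hm⟩ := id h0
    rw [bpos_0 key m hm.symm]
    simp [strip_version, stripLoop, endsC_true h0]
  ·
    by_cases h1 : (['-', '2', '.', '0'] : List Char) <:+ key.toList
    · obtain ⟨m, hm⟩ := id h1
      rw [bpos_1 key m hm.symm]
      simp [strip_version, stripLoop, endsC_true h1, endsC_false h0]
    ·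
      by_cases h2 : (['-', '3', '.', '0'] : List Char) <:+ key.toList
      · obtain ⟨m, hm⟩ := id h2
        rw [bpos_2 key m hm.symm]
        simp [strip_version, stripLoop, endsC_true h2, endsC_false h0, endsC_false h1]
      ·
        by_cases h3 : (['-', '4', '.', '0'] : List Char) <:+ key.toList
        · obtain ⟨m, hm⟩ := id h3
          rw [bpos_3 key m hm.symm]
          simp [strip_version, stripLoop, endsC_true h3, endsC_false h0, endsC_false h1, endsC_false h2]
        ·
          by_cases h4 : (['-', '5', '.', '0'] : List Char) <:+ key.toList
          · obtain ⟨m, hm⟩ := id h4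
            rw [bpos_4 key m hm.symm]
            simp [strip_version, stripLoop, endsC_true h4, endsC_false h0, endsC_false h1, endsC_false h2, endsC_false h3]
          ·
            by_cases h5 : (['-', '1'] : List Char) <:+ key.toList
            · obtain ⟨m, hm⟩ := id h5
              rw [bpos_5 key m hm.symm]
              simp [strip_version, stripLoop, endsC_true h5, endsC_false h0, endsC_false h1, endsC_false h2, endsC_false h3, endsC_false h4]
            ·
              by_cases h6 : (['-', '2'] : List Char) <:+ key.toList
              · obtain ⟨m, hm⟩ := id h6
                rw [bpos_6 key m hm.symm]
                simp [strip_version, stripLoop, endsC_true h6, endsC_false h0, endsC_false h1, endsC_false h2, endsC_false h3, endsC_false h4, endsC_false h5]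
              ·
                by_cases h7 : (['-', '3'] : List Char) <:+ key.toList
                · obtain ⟨m, hm⟩ := id h7
                  rw [bpos_7 key m hm.symm]
                  simp [strip_version, stripLoop, endsC_true h7, endsC_false h0, endsC_false h1, endsC_false h2, endsC_false h3, endsC_false h4, endsC_false h5, endsC_false h6]
                ·
                  by_cases h8 : (['-', '4'] : List Char) <:+ key.toList
                  · obtain ⟨m, hm⟩ := id h8
                    rw [bpos_8 key m hm.symm]
                    simp [strip_version, stripLoop, endsC_true h8, endsC_false h0, endsC_false h1, endsC_false h2, endsC_false h3, endsC_false h4, endsC_false h5, endsC_false h6, endsC_false h7]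
                  ·
                    by_cases h9 : (['-', '5'] : List Char) <:+ key.toList
                    · obtain ⟨m, hm⟩ := id h9
                      rw [bpos_9 key m hm.symm]
                      simp [strip_version, stripLoop, endsC_true h9, endsC_false h0, endsC_false h1, endsC_false h2, endsC_false h3, endsC_false h4, endsC_false h5, endsC_false h6, endsC_false h7, endsC_false h8]
                    ·
                      by_cases h10 : (['-', '1', '.', '1'] : List Char) <:+ key.toList
                      · obtain ⟨m, hm⟩ := id h10
                        rw [bpos_10 key m hm.symm]
                        simp [strip_version, stripLoop, endsC_true h10, endsC_false h0, endsC_false h1, endsC_false h2, endsC_false h3, endsC_false h4, endsC_false h5, endsC_false h6, endsC_false h7, endsC_false h8, endsC_false h9]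
                      ·
                        by_cases h11 : (['-', '2', '.', '1'] : List Char) <:+ key.toList
                        · obtain ⟨m, hm⟩ := id h11
                          rw [bpos_11 key m hm.symm]
                          simp [strip_version, stripLoop, endsC_true h11, endsC_false h0, endsC_false h1, endsC_false h2, endsC_false h3, endsC_false h4, endsC_false h5, endsC_false h6, endsC_false h7, endsC_false h8, endsC_false h9, endsC_false h10]
                        ·
                          by_cases h12 : (['-', '3', '.', '1'] : List Char) <:+ key.toList
                          · obtain ⟨m, hm⟩ := id h12
                            rw [bpos_12 key m hm.symm]
                            simp [strip_version, stripLoop, endsC_true h12, endsC_false h0, endsC_false h1, endsC_false h2, endsC_false h3, endsC_false h4, endsC_false h5, endsC_false h6, endsC_false h7, endsC_false h8, endsC_false h9, endsC_false h10, endsC_false h11]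
                          ·
                            by_cases h13 : (['-', '0'] : List Char) <:+ key.toList
                            · obtain ⟨m, hm⟩ := id h13
                              rw [bpos_13 key m hm.symm]
                              simp [strip_version, stripLoop, endsC_true h13, endsC_false h0, endsC_false h1, endsC_false h2, endsC_false h3, endsC_false h4, endsC_false h5, endsC_false h6, endsC_false h7, endsC_false h8, endsC_false h9, endsC_false h10, endsC_false h11, endsC_false h12]
                            ·
                              by_cases h14 : (['-', '0', '.', '1'] : List Char) <:+ key.toList
                              · obtain ⟨m, hm⟩ := id h14
                                rw [bpos_14 key m hm.symm]
                                simp [strip_version, stripLoop, endsC_true h14, endsC_false h0, endsC_false h1, endsC_false h2, endsC_false h3, endsC_false h4, endsC_false h5, endsC_false h6, endsC_false h7, endsC_false h8, endsC_false h9, endsC_false h10, endsC_false h11, endsC_false h12, endsC_false h13]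
                              ·
                                by_cases h15 : (['-', '0', '.', '2'] : List Char) <:+ key.toList
                                · obtain ⟨m, hm⟩ := id h15
                                  rw [bpos_15 key m hm.symm]
                                  simp [strip_version, stripLoop, endsC_true h15, endsC_false h0, endsC_false h1, endsC_false h2, endsC_false h3, endsC_false h4, endsC_false h5, endsC_false h6, endsC_false h7, endsC_false h8, endsC_false h9, endsC_false h10, endsC_false h11, endsC_false h12, endsC_false h13, endsC_false h14]
                                ·
                                  by_cases h16 : (['-', 'o', 'n', 'l', 'y'] : List Char) <:+ key.toList
                                  · obtain ⟨m, hm⟩ := id h16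
                                    rw [bpos_16 key m hm.symm]
                                    simp [strip_version, stripLoop, endsC_true h16, endsC_false h0, endsC_false h1, endsC_false h2, endsC_false h3, endsC_false h4, endsC_false h5, endsC_false h6, endsC_false h7, endsC_false h8, endsC_false h9, endsC_false h10, endsC_false h11, endsC_false h12, endsC_false h13, endsC_false h14, endsC_false h15]
                                  ·
                                    by_cases h17 : (['-', 'o', 'r', '-', 'l', 'a', 't', 'e', 'r'] : List Char) <:+ key.toList
                                    · obtain ⟨m, hm⟩ := id h17
                                      rw [bpos_17 key m hm.symm]
                                      simp [strip_version, stripLoop, endsC_true h17, endsC_false h0, endsC_false h1, endsC_false h2, endsC_false h3, endsC_false h4, endsC_false h5, endsC_false h6, endsC_false h7, endsC_false h8, endsC_false h9, endsC_false h10, endsC_false h11, endsC_false h12, endsC_false h13, endsC_false h14, endsC_false h15, endsC_false h16]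
                                    ·
                                      have hB : strip_version_alt key = key := by
                                        unfold strip_version_alt
                                        apply nohit key _ 0 [] _ PT1
                                        rintro q hq ⟨_, hdrop⟩
                                        simp only [List.length_nil, List.drop_zero] at hdrop
                                        simp only [revSufs, List.mem_cons, List.not_mem_nil, or_false] at hq
                                        rcases hq with rfl|rfl|rfl|rfl|rfl|rfl|rfl|rfl|rfl|rfl|rfl|rfl|rfl|rfl|rfl|rfl|rfl|rfl
                                        · rw [show (['0', '.', '1', '-'] : List Char) = (['-', '1', '.', '0'] : List Char).reverse from rfl] at hdrop
                                          exact h0 (List.reverse_prefix.mp hdrop)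
                                        · rw [show (['0', '.', '2', '-'] : List Char) = (['-', '2', '.', '0'] : List Char).reverse from rfl] at hdrop
                                          exact h1 (List.reverse_prefix.mp hdrop)
                                        · rw [show (['0', '.', '3', '-'] : List Char) = (['-', '3', '.', '0'] : List Char).reverse from rfl] at hdrop
                                          exact h2 (List.reverse_prefix.mp hdrop)
                                        · rw [show (['0', '.', '4', '-'] : List Char) = (['-', '4', '.', '0'] : List Char).reverse from rfl] at hdrop
                                          exact h3 (List.reverse_prefix.mp hdrop)
                                        · rw [show (['0', '.', '5', '-'] : List Char) = (['-', '5', '.', '0'] : List Char).reverse from rfl] at hdrop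
                                          exact h4 (List.reverse_prefix.mp hdrop)
                                        · rw [show (['1', '-'] : List Char) = (['-', '1'] : List Char).reverse from rfl] at hdrop
                                          exact h5 (List.reverse_prefix.mp hdrop)
                                        · rw [show (['2', '-'] : List Char) = (['-', '2'] : List Char).reverse from rfl] at hdrop
                                          exact h6 (List.reverse_prefix.mp hdrop)
                                        · rw [show (['3', '-'] : List Char) = (['-', '3'] : List Char).reverse from rfl] at hdrop
                                          exact h7 (List.reverse_prefix.mp hdrop)
                                        · rw [show (['4', '-'] : List Char) = (['-', '4'] : List Char).reverse from rfl] at hdrop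
                                          exact h8 (List.reverse_prefix.mp hdrop)
                                        · rw [show (['5', '-'] : List Char) = (['-', '5'] : List Char).reverse from rfl] at hdrop
                                          exact h9 (List.reverse_prefix.mp hdrop)
                                        · rw [show (['1', '.', '1', '-'] : List Char) = (['-', '1', '.', '1'] : List Char).reverse from rfl] at hdrop
                                          exact h10 (List.reverse_prefix.mp hdrop)
                                        · rw [show (['1', '.', '2', '-'] : List Char) = (['-', '2', '.', '1'] : List Char).reverse from rfl] at hdrop
                                          exact h11 (List.reverse_prefix.mp hdrop)
                                        · rw [show (['1', '.', '3', '-'] : List Char) = (['-', '3', '.', '1'] : List Char).reverse from rfl] at hdrop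
                                          exact h12 (List.reverse_prefix.mp hdrop)
                                        · rw [show (['0', '-'] : List Char) = (['-', '0'] : List Char).reverse from rfl] at hdrop
                                          exact h13 (List.reverse_prefix.mp hdrop)
                                        · rw [show (['1', '.', '0', '-'] : List Char) = (['-', '0', '.', '1'] : List Char).reverse from rfl] at hdrop
                                          exact h14 (List.reverse_prefix.mp hdrop)
                                        · rw [show (['2', '.', '0', '-'] : List Char) = (['-', '0', '.', '2'] : List Char).reverse from rfl] at hdrop
                                          exact h15 (List.reverse_prefix.mp hdrop)
                                        · rw [show (['y', 'l', 'n', 'o', '-'] : List Char) = (['-', 'o', 'n', 'l', 'y'] : List Char).reverse from rfl] at hdrop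
                                          exact h16 (List.reverse_prefix.mp hdrop)
                                        · rw [show (['r', 'e', 't', 'a', 'l', '-', 'r', 'o', '-'] : List Char) = (['-', 'o', 'r', '-', 'l', 'a', 't', 'e', 'r'] : List Char).reverse from rfl] at hdrop
                                          exact h17 (List.reverse_prefix.mp hdrop)
                                      rw [hB]
                                      simp [strip_version, stripLoop, endsC_false h0, endsC_false h1, endsC_false h2, endsC_false h3, endsC_false h4, endsC_false h5, endsC_false h6, endsC_false h7, endsC_false h8, endsC_false h9, endsC_false h10, endsC_false h11, endsC_false h12, endsC_false h13, endsC_false h14, endsC_false h15, endsC_false h16, endsC_false h17]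


-- ===== VERDICT (by name: the statement is the Claim_ definition above) =====
theorem strip_version_spec : Claim_equal_strip_version := by
  intro key _
  unfold Spec_strip_version
  exact main_eq key
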